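-- pv_equiv track=rewrite | github.com/SEONMl/Solutions | venv/Category/Programmers/Lv2/더맵게.py | solution
-- ===== SOURCE A (Python) =====
-- import heapq
--
-- def solution(scoville,k):
--     cnt=0
--     heap=[]
--     for i in scoville:
--         heapq.heappush(heap,i)
--     while heap[0]<k:
--         try:
--             res=heapq.heappop(heap)+heapq.heappop(heap)*2
--             cnt+=1
--             heapq.heappush(heap,res)
--         except IndexError:
--             return -1
--     return cnt
-- ===== SOURCE B (Python) =====
-- from collections import deque
--
-- def solution(scoville, k):
--     # Sort once, then merge the sorted originals with a FIFO of combined values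
--     # (combined values come out in the order they must be consumed).
--     xs = sorted(scoville)
--     q = deque()
--     i = 0
--     cnt = 0
--
--     def take():
--         nonlocal i
--         if i < len(xs) and (not q or xs[i] <= q[0]):
--             i += 1
--             return xs[i - 1]
--         return q.popleft()
--
--     while (xs[i] if i < len(xs) and (not q or xs[i] <= q[0]) else q[0]) < k:
--         first = take()
--         if i == len(xs) and not q:
--             return -1
--         second = take()
--         q.append(first + second * 2)
--         cnt += 1
--     return cnt
-- ===== Notes on version B (the rewrite author's own statement) =====
-- stated objective: faster
-- what changed: Replaces the binary heap with one initial sort plus a FIFO queue of combined values: since combined values are produced in nondecreasing order, the current minimum is always the front of the sorted originals or the front of the queue, so each combine step costs O(1) instead of O(log n) heap sifting.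
import Mathlib
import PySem

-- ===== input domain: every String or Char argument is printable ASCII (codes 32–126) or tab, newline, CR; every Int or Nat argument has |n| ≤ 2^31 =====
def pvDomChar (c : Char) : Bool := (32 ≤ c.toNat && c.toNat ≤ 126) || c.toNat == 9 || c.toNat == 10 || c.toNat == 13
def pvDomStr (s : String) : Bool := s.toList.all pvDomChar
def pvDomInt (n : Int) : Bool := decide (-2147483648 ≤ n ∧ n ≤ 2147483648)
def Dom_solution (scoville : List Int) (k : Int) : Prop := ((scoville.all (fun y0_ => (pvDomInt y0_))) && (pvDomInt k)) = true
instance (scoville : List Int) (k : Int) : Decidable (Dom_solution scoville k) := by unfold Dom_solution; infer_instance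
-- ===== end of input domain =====

-- B replaces A's binary heap with one sorted pass plus a FIFO queue of combined values
-- (combined values are produced in nondecreasing order), so each combine step is O(1)
-- instead of O(log n); return values agree wherever A returns (Pre_: scoville ≠ []).

-- ===== PORT A =====
-- heapq is modelled by its contract: the heap is the multiset of pushed elements and
-- heappop returns its minimum; we represent that multiset as a sorted list (heappush =
-- ordered insert, heappop = head).  This is exact for A's output, which depends only on
-- the multiset contents and on which element is the minimum.
def pvALoop (k : Int) (heap : List Int) (cnt : Int) : Int :=
  match heap with
  | [] => cnt                      -- unreachable while the loop runs (heap[0] would have raised)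
  | a :: rest =>                   -- while heap[0] < k:
    if a < k then
      match rest with
      | [] => -1                   -- second heappop raises IndexError -> return -1
      | b :: rest' =>              -- res = heappop(heap) + heappop(heap)*2; heappush(heap, res)
        pvALoop k (List.orderedInsert (· ≤ ·) (a + b * 2) rest') (cnt + 1)
    else cnt
termination_by heap.length
decreasing_by
  simp [List.Perm.length_eq (List.perm_orderedInsert _ _ _)]

def solution (scoville : List Int) (k : Int) : Int :=
  -- for i in scoville: heapq.heappush(heap, i)
  pvALoop k (scoville.foldl (fun h i => List.orderedInsert (· ≤ ·) i h) []) 0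

-- ===== PORT B =====
-- take(): pop the smaller of the two fronts (ties prefer the sorted originals, as Source B's
-- `xs[i] <= q[0]` does); the index i into xs is represented by the remaining suffix rem.
def pvPop (rem q : List Int) : Int × List Int × List Int :=
  match rem, q with
  | [], [] => (0, [], [])          -- never consulted: Source B raises before calling take() here
  | x :: r, [] => (x, r, [])
  | [], c :: qq => (c, [], qq)
  | x :: r, c :: qq => if x ≤ c then (x, r, c :: qq) else (c, x :: r, qq)

-- the guard expression: current minimum, none iff both structures are exhausted
def pvFront (rem q : List Int) : Option Int :=
  match rem, q with
  | [], [] => none                 -- q[0] raises IndexError (only reachable on empty input)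
  | x :: _, [] => some x
  | [], c :: _ => some c
  | x :: _, c :: _ => some (if x ≤ c then x else c)

lemma pvPop_length (rem q : List Int) (h : ¬(rem = [] ∧ q = [])) :
    (pvPop rem q).2.1.length + (pvPop rem q).2.2.length + 1 = rem.length + q.length := by
  cases rem <;> cases q <;> simp [pvPop] at h ⊢
  split <;> simp <;> omega

lemma pvFront_none_iff (rem q : List Int) : pvFront rem q = none ↔ rem = [] ∧ q = [] := by
  cases rem <;> cases q <;> simp [pvFront]

def pvBLoop (k : Int) (rem q : List Int) (cnt : Int) : Int :=
  match hfr : pvFront rem q with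
  | none => cnt                    -- unreachable from a nonempty start (Source B raises on empty input)
  | some m =>
    if m < k then
      let p1 := pvPop rem q        -- first = take()
      if hne : p1.2.1 = [] ∧ p1.2.2 = [] then -1   -- if i == len(xs) and not q: return -1
      else
        let p2 := pvPop p1.2.1 p1.2.2              -- second = take()
        pvBLoop k p2.2.1 (p2.2.2 ++ [p1.1 + p2.1 * 2]) (cnt + 1)  -- q.append(first + second*2)
    else cnt
termination_by rem.length + q.length
decreasing_by
  have h1 := pvPop_length rem q (by
    intro hc; rw [(pvFront_none_iff rem q).2 hc] at hfr; cases hfr)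
  have h2 := pvPop_length (pvPop rem q).2.1 (pvPop rem q).2.2 hne
  simp only [List.length_append, List.length_cons, List.length_nil]
  omega

def solution_alt (scoville : List Int) (k : Int) : Int :=
  pvBLoop k (PySem.List.sorted scoville (fun x => x)) [] 0

-- ===== PRECONDITION & SPEC =====
-- Pre_ excludes only the empty list, on which A raises IndexError at `heap[0]`.
def Pre_solution (scoville : List Int) (k : Int) : Prop := scoville ≠ []
instance (scoville : List Int) (k : Int) : Decidable (Pre_solution scoville k) := by unfold Pre_solution; infer_instance
def pvWitness_solution : List Int × Int := ([1, 2, 3, 9, 10, 12], 7)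

def Spec_solution (scoville : List Int) (k : Int) (out : Int) : Prop := out = solution_alt scoville k
instance (scoville : List Int) (k : Int) (out : Int) : Decidable (Spec_solution scoville k out) := by unfold Spec_solution; infer_instance

-- ===== CLAIM (what is proved, stated in full; the proofs are below) =====
def Claim_equal_solution : Prop := ∀ (scoville : List Int) (k : Int), Dom_solution scoville k → Pre_solution scoville k → Spec_solution scoville k (solution scoville k)

-- ===== LEMMAS AND PROOFS =====

-- the combined value a cert (a, b) stands for
def pvVal (p : Int × Int) : Int := p.1 + p.2 * 2

-- sorted merge of the two B-side structures; equals A's sorted heap list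
def pvMerge : List Int → List Int → List Int
  | [], q => q
  | x :: r, [] => x :: r
  | x :: r, c :: qq => if x ≤ c then x :: pvMerge r (c :: qq) else c :: pvMerge (x :: r) qq
termination_by rem q => rem.length + q.length

lemma pvMerge_nil_right (rem : List Int) : pvMerge rem [] = rem := by
  cases rem <;> simp [pvMerge]

lemma pvMerge_perm (rem q : List Int) : (pvMerge rem q).Perm (rem ++ q) := by
  induction rem, q using pvMerge.induct with
  | case1 q => simp [pvMerge]
  | case2 x r => simp [pvMerge]
  | case3 x r c qq h ih => simp [pvMerge, h]; exact ih
  | case4 x r c qq h ih =>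
    rw [pvMerge, if_neg h]
    exact ((ih.cons c).trans (List.perm_middle).symm)

lemma pvMerge_pairwise (rem q : List Int) (hr : rem.Pairwise (· ≤ ·)) (hq : q.Pairwise (· ≤ ·)) :
    (pvMerge rem q).Pairwise (· ≤ ·) := by
  induction rem, q using pvMerge.induct with
  | case1 q => simpa [pvMerge]
  | case2 x r => simpa [pvMerge] using hr
  | case3 x r c qq h ih =>
    rw [List.pairwise_cons] at hr
    simp [pvMerge, h, List.pairwise_cons]
    refine ⟨?_, ih hr.2 hq⟩
    intro y hy
    have := (pvMerge_perm r (c :: qq)).mem_iff.1 hy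
    simp at this
    rcases this with hy | rfl | hy
    · exact hr.1 y hy
    · exact h
    · rw [List.pairwise_cons] at hq; exact le_trans h (hq.1 y hy)
  | case4 x r c qq h ih =>
    rw [List.pairwise_cons] at hq
    simp [pvMerge, h, List.pairwise_cons]
    refine ⟨?_, ih hr hq.2⟩
    intro y hy
    have := (pvMerge_perm (x :: r) qq).mem_iff.1 hy
    simp at this
    rcases this with rfl | hy | hy
    · omega
    · rw [List.pairwise_cons] at hr; exact le_trans (by omega) (hr.1 y hy)
    · exact hq.1 y hy

-- loop invariant on B's state: both structures sorted, and every queue entry carries a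
-- certificate (a, b) (its two combined sources) whose components are dominated by all
-- remaining originals and by every older queue entry's value.
def pvInv (rem q : List Int) : Prop :=
  rem.Pairwise (· ≤ ·) ∧ q.Pairwise (· ≤ ·) ∧
  ∃ cs : List (Int × Int),
    q = cs.map pvVal ∧
    (∀ p ∈ cs, p.1 ≤ p.2 ∧ ∀ x ∈ rem, p.2 ≤ x) ∧
    cs.Pairwise (fun p p' => p'.2 ≤ pvVal p)

lemma pvInv_step (r2 q2 : List Int) (a b : Int) (cs2 : List (Int × Int))
    (hr2 : r2.Pairwise (· ≤ ·)) (hq2 : q2.Pairwise (· ≤ ·))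
    (hmap : q2 = cs2.map pvVal)
    (hcs : ∀ p ∈ cs2, p.1 ≤ p.2 ∧ (∀ x ∈ r2, p.2 ≤ x) ∧ p.1 ≤ a ∧ p.2 ≤ b)
    (hpw : cs2.Pairwise (fun p p' => p'.2 ≤ pvVal p))
    (hab : a ≤ b) (hbr : ∀ x ∈ r2, b ≤ x) (hbq : ∀ y ∈ q2, b ≤ y) :
    pvInv r2 (q2 ++ [a + b * 2]) := by
  refine ⟨hr2, ?_, cs2 ++ [(a, b)], by simp [hmap, pvVal], ?_, ?_⟩
  · rw [List.pairwise_append]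
    refine ⟨hq2, by simp, ?_⟩
    intro y hy z hz
    simp at hz; subst hz
    rw [hmap] at hy
    obtain ⟨p, hp, rfl⟩ := List.mem_map.1 hy
    have := hcs p hp
    simp [pvVal]; omega
  · intro p hp
    simp at hp
    rcases hp with hp | rfl
    · exact ⟨(hcs p hp).1, (hcs p hp).2.1⟩
    · exact ⟨hab, hbr⟩
  · rw [List.pairwise_append]
    refine ⟨hpw, by simp, ?_⟩
    intro p hp p' hp'
    simp at hp'; subst hp'
    exact hbq _ (hmap ▸ List.mem_map_of_mem hp)

lemma pvOrderedInsert_merge (r2 q2 : List Int) (v : Int)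
    (hr2 : r2.Pairwise (· ≤ ·)) (hq2 : q2.Pairwise (· ≤ ·))
    (hle : ∀ y ∈ q2, y ≤ v) :
    List.orderedInsert (· ≤ ·) v (pvMerge r2 q2) = pvMerge r2 (q2 ++ [v]) := by
  refine List.Perm.eq_of_pairwise (fun a b _ _ h1 h2 => le_antisymm h1 h2) ?_ ?_ ?_
  · exact List.Pairwise.orderedInsert v _ (pvMerge_pairwise r2 q2 hr2 hq2)
  · refine pvMerge_pairwise r2 (q2 ++ [v]) hr2 ?_
    rw [List.pairwise_append]
    exact ⟨hq2, by simp, by intro y hy z hz; simp at hz; subst hz; exact hle y hy⟩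
  · refine (List.perm_orderedInsert _ _ _).trans ?_
    refine (((pvMerge_perm r2 q2).cons v).trans ?_).trans (pvMerge_perm r2 (q2 ++ [v])).symm
    have : (r2 ++ (q2 ++ [v])) = ((r2 ++ q2) ++ [v]) := by simp
    rw [this]
    exact (List.perm_append_singleton v (r2 ++ q2)).symm

-- one-step unfolding lemmas for the two loops
lemma pvALoop_nil (k cnt : Int) : pvALoop k [] cnt = cnt := by rw [pvALoop.eq_def]

lemma pvMerge_nil_left (q : List Int) : pvMerge [] q = q := by rw [pvMerge]

lemma pvBLoop_none (k : Int) (rem q : List Int) (cnt : Int)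
    (hfr : pvFront rem q = none) : pvBLoop k rem q cnt = cnt := by
  rw [pvBLoop]; split
  · rfl
  · next m' hfr' => rw [hfr] at hfr'; cases hfr'

lemma pvALoop_stop (k a : Int) (t : List Int) (cnt : Int) (hk : ¬ a < k) :
    pvALoop k (a :: t) cnt = cnt := by rw [pvALoop.eq_def]; simp [hk]

lemma pvALoop_one (k a cnt : Int) (hk : a < k) : pvALoop k [a] cnt = -1 := by
  rw [pvALoop.eq_def]; simp [hk]

lemma pvALoop_cons2 (k a b : Int) (t : List Int) (cnt : Int) (hk : a < k) :
    pvALoop k (a :: b :: t) cnt =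
      pvALoop k (List.orderedInsert (· ≤ ·) (a + b * 2) t) (cnt + 1) := by
  rw [pvALoop.eq_def]; simp [hk]

lemma pvBLoop_stop (k : Int) (rem q : List Int) (cnt m : Int)
    (hfr : pvFront rem q = some m) (hk : ¬ m < k) : pvBLoop k rem q cnt = cnt := by
  rw [pvBLoop]; split
  · rfl
  · next m' hfr' => rw [hfr] at hfr'; cases hfr'; simp [hk]

lemma pvBLoop_neg1 (k : Int) (rem q : List Int) (cnt m : Int)
    (hfr : pvFront rem q = some m) (hk : m < k)
    (hne : (pvPop rem q).2.1 = [] ∧ (pvPop rem q).2.2 = []) : pvBLoop k rem q cnt = -1 := by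
  rw [pvBLoop]; split
  · next hfr' => rw [hfr] at hfr'; cases hfr'
  · next m' hfr' => rw [hfr] at hfr'; cases hfr'; simp [hk, hne]

lemma pvBLoop_step (k : Int) (rem q : List Int) (cnt m : Int)
    (hfr : pvFront rem q = some m) (hk : m < k)
    (hne : ¬((pvPop rem q).2.1 = [] ∧ (pvPop rem q).2.2 = [])) :
    pvBLoop k rem q cnt =
      pvBLoop k (pvPop (pvPop rem q).2.1 (pvPop rem q).2.2).2.1
        ((pvPop (pvPop rem q).2.1 (pvPop rem q).2.2).2.2 ++
          [(pvPop rem q).1 + (pvPop (pvPop rem q).2.1 (pvPop rem q).2.2).1 * 2]) (cnt + 1) := by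
  rw [pvBLoop]; split
  · next hfr' => rw [hfr] at hfr'; cases hfr'
  · next m' hfr' => rw [hfr] at hfr'; cases hfr'; simp [hk, hne]

-- the recursive case packaged: after one synchronized step, finish with the invariant and IH
lemma pvStep (k : Int) (n : Nat)
    (IH : ∀ (rem q : List Int) (cnt : Int), rem.length + q.length ≤ n → pvInv rem q →
      pvBLoop k rem q cnt = pvALoop k (pvMerge rem q) cnt)
    (r2 q2 : List Int) (a b : Int) (cs2 : List (Int × Int)) (cnt : Int)
    (hlen : r2.length + q2.length + 1 ≤ n)
    (hr2 : r2.Pairwise (· ≤ ·)) (hq2 : q2.Pairwise (· ≤ ·))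
    (hmap : q2 = cs2.map pvVal)
    (hcs : ∀ p ∈ cs2, p.1 ≤ p.2 ∧ (∀ x ∈ r2, p.2 ≤ x) ∧ p.1 ≤ a ∧ p.2 ≤ b)
    (hpw : cs2.Pairwise (fun p p' => p'.2 ≤ pvVal p))
    (hab : a ≤ b) (hbr : ∀ x ∈ r2, b ≤ x) (hbq : ∀ y ∈ q2, b ≤ y) :
    pvBLoop k r2 (q2 ++ [a + b * 2]) (cnt + 1) =
      pvALoop k (List.orderedInsert (· ≤ ·) (a + b * 2) (pvMerge r2 q2)) (cnt + 1) := by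
  have hle : ∀ y ∈ q2, y ≤ a + b * 2 := by
    intro y hy
    rw [hmap] at hy
    obtain ⟨p, hp, rfl⟩ := List.mem_map.1 hy
    have := hcs p hp
    simp [pvVal]; omega
  rw [pvOrderedInsert_merge r2 q2 (a + b * 2) hr2 hq2 hle]
  exact IH r2 (q2 ++ [a + b * 2]) (cnt + 1) (by simp; omega)
    (pvInv_step r2 q2 a b cs2 hr2 hq2 hmap hcs hpw hab hbr hbq)


theorem pvLoop_eq (k : Int) : ∀ (n : Nat) (rem q : List Int) (cnt : Int),
    rem.length + q.length ≤ n → pvInv rem q →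
    pvBLoop k rem q cnt = pvALoop k (pvMerge rem q) cnt := by
  intro n
  induction n with
  | zero =>
    intro rem q cnt hlen _
    have hrq : rem = [] ∧ q = [] := by
      constructor <;> (cases rem <;> cases q <;> simp_all)
    obtain ⟨rfl, rfl⟩ := hrq
    rw [pvBLoop_none k [] [] cnt rfl, pvMerge_nil_left, pvALoop_nil]
  | succ n IH =>
    intro rem q cnt hlen hinv
    obtain ⟨hr, hq, cs, hmap, hcert, hpw⟩ := hinv
    cases rem with
    | nil =>
      cases q with
      | nil => rw [pvBLoop_none k [] [] cnt rfl, pvMerge_nil_left, pvALoop_nil]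
      | cons c qq =>
        have hfr : pvFront [] (c :: qq) = some c := rfl
        have hq' := List.pairwise_cons.1 hq
        by_cases hk : c < k
        · cases qq with
          | nil =>
            rw [pvBLoop_neg1 k [] [c] cnt c hfr hk (by simp [pvPop])]
            rw [pvMerge_nil_left, pvALoop_one k c cnt hk]
          | cons c2 qq2 =>
            rcases cs with _ | ⟨p0, cs'⟩
            · simp at hmap
            rcases cs' with _ | ⟨p1, cs2⟩
            · simp at hmap
            simp only [List.map_cons, List.cons.injEq] at hmap
            obtain ⟨h0, h1, hmap2⟩ := hmap
            have hq2' := List.pairwise_cons.1 hq'.2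
            rw [pvBLoop_step k [] (c :: c2 :: qq2) cnt c hfr hk (by simp [pvPop])]
            simp only [pvPop]
            rw [pvMerge_nil_left, pvALoop_cons2 k c c2 qq2 cnt hk]
            conv_rhs => rw [← pvMerge_nil_left qq2]
            refine pvStep k n IH [] qq2 c c2 cs2 cnt ?_ List.Pairwise.nil hq2'.2 hmap2 ?_
              (hpw.of_cons.of_cons) (hq'.1 c2 (by simp)) (by simp) hq2'.1
            · simp only [List.length_cons] at hlen ⊢; omega
            · intro p hp
              have h1' := hcert p (by simp [hp])
              have hp0 := (List.pairwise_cons.1 hpw).1 p (by simp [hp])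
              have hp1 := (List.pairwise_cons.1 hpw.of_cons).1 p hp
              exact ⟨h1'.1, by simp, by rw [h0]; omega, by rw [h1]; omega⟩
        · rw [pvBLoop_stop k [] (c :: qq) cnt c hfr hk, pvMerge_nil_left,
            pvALoop_stop k c qq cnt hk]
    | cons x r =>
      have hr' := List.pairwise_cons.1 hr
      cases q with
      | nil =>
        have hcs0 : cs = [] := by cases cs with | nil => rfl | cons a b => simp at hmap
        subst hcs0
        have hfr : pvFront (x :: r) [] = some x := rfl
        by_cases hk : x < k
        · cases r with
          | nil =>
            rw [pvBLoop_neg1 k [x] [] cnt x hfr hk (by simp [pvPop])]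
            rw [pvMerge_nil_right, pvALoop_one k x cnt hk]
          | cons y r' =>
            have hr2' := List.pairwise_cons.1 hr'.2
            rw [pvBLoop_step k (x :: y :: r') [] cnt x hfr hk (by simp [pvPop])]
            simp only [pvPop]
            rw [pvMerge_nil_right, pvALoop_cons2 k x y r' cnt hk]
            conv_rhs => rw [← pvMerge_nil_right r']
            refine pvStep k n IH r' [] x y [] cnt ?_ hr2'.2 List.Pairwise.nil rfl
              (by simp) List.Pairwise.nil (hr'.1 y (by simp)) hr2'.1 (by simp)
            simp only [List.length_cons] at hlen ⊢; omega
        · rw [pvBLoop_stop k (x :: r) [] cnt x hfr hk, pvMerge_nil_right,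
            pvALoop_stop k x r cnt hk]
      | cons c qq =>
        have hq' := List.pairwise_cons.1 hq
        by_cases hxc : x ≤ c
        · have hfr : pvFront (x :: r) (c :: qq) = some x := by simp [pvFront, hxc]
          by_cases hk : x < k
          · rw [pvBLoop_step k (x :: r) (c :: qq) cnt x hfr hk (by simp [pvPop, hxc])]
            cases r with
            | nil =>
              rcases cs with _ | ⟨p0, cs'⟩
              · simp at hmap
              simp only [List.map_cons, List.cons.injEq] at hmap
              obtain ⟨h0, hmap2⟩ := hmap
              simp only [pvPop, if_pos hxc]
              have hm : pvMerge [x] (c :: qq) = x :: c :: qq := by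
                simp [pvMerge, hxc, pvMerge_nil_left]
              rw [hm, pvALoop_cons2 k x c qq cnt hk]
              conv_rhs => rw [← pvMerge_nil_left qq]
              refine pvStep k n IH [] qq x c cs' cnt ?_ List.Pairwise.nil hq'.2 hmap2 ?_
                hpw.of_cons hxc (by simp) hq'.1
              · simp only [List.length_cons] at hlen ⊢; omega
              · intro p hp
                have h1' := hcert p (by simp [hp])
                have hp0 := (List.pairwise_cons.1 hpw).1 p hp
                have hx := h1'.2 x (by simp)
                exact ⟨h1'.1, by simp, by omega, by rw [h0]; omega⟩
            | cons y r' =>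
              have hr2' := List.pairwise_cons.1 hr'.2
              by_cases hyc : y ≤ c
              · simp only [pvPop, if_pos hxc, if_pos hyc]
                have hm : pvMerge (x :: y :: r') (c :: qq) =
                    x :: y :: pvMerge r' (c :: qq) := by
                  rw [pvMerge, if_pos hxc, pvMerge, if_pos hyc]
                rw [hm, pvALoop_cons2 k x y (pvMerge r' (c :: qq)) cnt hk]
                refine pvStep k n IH r' (c :: qq) x y cs cnt ?_ hr2'.2 hq hmap ?_
                  hpw (hr'.1 y (by simp)) hr2'.1 ?_
                · simp only [List.length_cons] at hlen ⊢; omega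
                · intro p hp
                  have h1' := hcert p hp
                  have hx := h1'.2 x (by simp)
                  have hy := h1'.2 y (by simp)
                  exact ⟨h1'.1, fun z hz => h1'.2 z (by simp [hz]), by omega, hy⟩
                · intro z hz
                  rcases List.mem_cons.1 hz with rfl | hz
                  · exact hyc
                  · exact le_trans hyc (hq'.1 z hz)
              · rcases cs with _ | ⟨p0, cs'⟩
                · simp at hmap
                simp only [List.map_cons, List.cons.injEq] at hmap
                obtain ⟨h0, hmap2⟩ := hmap
                simp only [pvPop, if_pos hxc, if_neg hyc]
                have hm : pvMerge (x :: y :: r') (c :: qq) =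
                    x :: c :: pvMerge (y :: r') qq := by
                  rw [pvMerge, if_pos hxc, pvMerge, if_neg hyc]
                rw [hm, pvALoop_cons2 k x c (pvMerge (y :: r') qq) cnt hk]
                refine pvStep k n IH (y :: r') qq x c cs' cnt ?_ hr'.2 hq'.2 hmap2 ?_
                  hpw.of_cons hxc ?_ hq'.1
                · simp only [List.length_cons] at hlen ⊢; omega
                · intro p hp
                  have h1' := hcert p (by simp [hp])
                  have hp0 := (List.pairwise_cons.1 hpw).1 p hp
                  have hx := h1'.2 x (by simp)
                  exact ⟨h1'.1, fun z hz => h1'.2 z (by simp [hz]), by omega, by rw [h0]; omega⟩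
                · intro z hz
                  rcases List.mem_cons.1 hz with rfl | hz
                  · omega
                  · exact le_trans (by omega) (hr2'.1 z hz)
          · rw [pvBLoop_stop k (x :: r) (c :: qq) cnt x hfr hk]
            have hm : pvMerge (x :: r) (c :: qq) = x :: pvMerge r (c :: qq) := by
              rw [pvMerge, if_pos hxc]
            rw [hm, pvALoop_stop k x _ cnt hk]
        · have hfr : pvFront (x :: r) (c :: qq) = some c := by simp [pvFront, hxc]
          rcases cs with _ | ⟨p0, cs'⟩
          · simp at hmap
          simp only [List.map_cons, List.cons.injEq] at hmap
          obtain ⟨h0, hmap1⟩ := hmap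
          by_cases hk : c < k
          · rw [pvBLoop_step k (x :: r) (c :: qq) cnt c hfr hk (by simp [pvPop, hxc])]
            cases qq with
            | nil =>
              have hcs0 : cs' = [] := by
                cases cs' with | nil => rfl | cons a b => simp at hmap1
              subst hcs0
              simp only [pvPop, if_neg hxc]
              have hm : pvMerge (x :: r) [c] = c :: x :: r := by
                rw [pvMerge, if_neg hxc, pvMerge_nil_right]
              rw [hm, pvALoop_cons2 k c x r cnt hk]
              conv_rhs => rw [← pvMerge_nil_right r]
              refine pvStep k n IH r [] c x [] cnt ?_ hr'.2 List.Pairwise.nil rfl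
                (by simp) List.Pairwise.nil (by omega) hr'.1 (by simp)
              simp only [List.length_cons] at hlen ⊢; omega
            | cons c2 qq2 =>
              rcases cs' with _ | ⟨p1, cs2⟩
              · simp at hmap1
              simp only [List.map_cons, List.cons.injEq] at hmap1
              obtain ⟨h1, hmap2⟩ := hmap1
              have hq2' := List.pairwise_cons.1 hq'.2
              by_cases hxc2 : x ≤ c2
              · simp only [pvPop, if_neg hxc, if_pos hxc2]
                have hm : pvMerge (x :: r) (c :: c2 :: qq2) =
                    c :: x :: pvMerge r (c2 :: qq2) := by
                  rw [pvMerge, if_neg hxc, pvMerge, if_pos hxc2]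
                rw [hm, pvALoop_cons2 k c x (pvMerge r (c2 :: qq2)) cnt hk]
                refine pvStep k n IH r (c2 :: qq2) c x (p1 :: cs2) cnt ?_ hr'.2 hq'.2
                  (by rw [h1, hmap2]; rfl) ?_ hpw.of_cons (by omega) hr'.1 ?_
                · simp only [List.length_cons] at hlen ⊢; omega
                · intro p hp
                  have h1' := hcert p (by simp [hp])
                  have hp0 := (List.pairwise_cons.1 hpw).1 p hp
                  have hx := h1'.2 x (by simp)
                  exact ⟨h1'.1, fun z hz => h1'.2 z (by simp [hz]), by rw [h0]; omega, hx⟩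
                · intro z hz
                  rcases List.mem_cons.1 hz with rfl | hz
                  · exact hxc2
                  · exact le_trans hxc2 (hq2'.1 z hz)
              · simp only [pvPop, if_neg hxc, if_neg hxc2]
                have hm : pvMerge (x :: r) (c :: c2 :: qq2) =
                    c :: c2 :: pvMerge (x :: r) qq2 := by
                  rw [pvMerge, if_neg hxc, pvMerge, if_neg hxc2]
                rw [hm, pvALoop_cons2 k c c2 (pvMerge (x :: r) qq2) cnt hk]
                refine pvStep k n IH (x :: r) qq2 c c2 cs2 cnt ?_ hr hq2'.2 hmap2 ?_
                  hpw.of_cons.of_cons (hq'.1 c2 (by simp)) ?_ hq2'.1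
                · simp only [List.length_cons] at hlen ⊢; omega
                · intro p hp
                  have h1' := hcert p (by simp [hp])
                  have hp0 := (List.pairwise_cons.1 hpw).1 p (by simp [hp])
                  have hp1 := (List.pairwise_cons.1 hpw.of_cons).1 p hp
                  exact ⟨h1'.1, fun z hz => h1'.2 z hz, by rw [h0]; omega, by rw [h1]; omega⟩
                · intro z hz
                  rcases List.mem_cons.1 hz with rfl | hz
                  · omega
                  · exact le_trans (by omega) (hr'.1 z hz)
          · rw [pvBLoop_stop k (x :: r) (c :: qq) cnt c hfr hk]
            have hm : pvMerge (x :: r) (c :: qq) = c :: pvMerge (x :: r) qq := by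
              rw [pvMerge, if_neg hxc]
            rw [hm, pvALoop_stop k c _ cnt hk]


lemma pvFoldl_ins (l acc : List Int) (hacc : acc.Pairwise (· ≤ ·)) :
    (l.foldl (fun h i => List.orderedInsert (· ≤ ·) i h) acc).Pairwise (· ≤ ·) ∧
    (l.foldl (fun h i => List.orderedInsert (· ≤ ·) i h) acc).Perm (acc ++ l) := by
  induction l generalizing acc with
  | nil => simp [hacc]
  | cons x l ih =>
    have h := ih (List.orderedInsert (· ≤ ·) x acc) (List.Pairwise.orderedInsert x acc hacc)
    refine ⟨h.1, ?_⟩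
    refine h.2.trans ?_
    exact ((List.perm_orderedInsert _ _ _).append_right l).trans List.perm_middle.symm

lemma pvHeapBuild_eq (scoville : List Int) :
    scoville.foldl (fun h i => List.orderedInsert (· ≤ ·) i h) [] =
      PySem.List.sorted scoville (fun x => x) := by
  have h := pvFoldl_ins scoville [] List.Pairwise.nil
  exact (PySem.List.sorted_id_eq_of_perm_of_pairwise scoville _ (by simpa using h.2) h.1).symm

-- ===== VERDICT (by name: the statement is the Claim_ definition above) =====
theorem solution_spec : Claim_equal_solution := by
  intro scoville k _ _
  unfold Spec_solution solution solution_alt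
  rw [pvHeapBuild_eq]
  have h := pvLoop_eq k ((PySem.List.sorted scoville (fun x => x)).length)
    (PySem.List.sorted scoville (fun x => x)) [] 0 (by simp)
    ⟨PySem.List.sorted_pairwise scoville (fun x => x), List.Pairwise.nil, [], by simp, by simp,
      List.Pairwise.nil⟩
  rw [pvMerge_nil_right] at h
  exact h.symm
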